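-- pv_equiv track=rewrite | github.com/Yu-AnChen/quantification | pyimagej_rolling_ball.py | compute_chunk_size_and_overlap
-- ===== SOURCE A (Python) =====
-- import math
--
-- def compute_chunk_size_and_overlap(chunk_size, overlap_depth, img_size):
--     # small image
--     if (img_size <= chunk_size) or (img_size <= overlap_depth):
--         return img_size, 0
--     # small chunk
--     if chunk_size <= overlap_depth:
--         chunk_size = overlap_depth
--     chunk_size = math.ceil(chunk_size / 8) * 8
--     if img_size % chunk_size < overlap_depth:
--         # increase chunk_size to have more "space" for the remainder
--         chunk_size += 8
--         return compute_chunk_size_and_overlap(chunk_size, overlap_depth, img_size)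
--     else:
--         return chunk_size, overlap_depth
-- ===== SOURCE B (Python) =====
-- def compute_chunk_size_and_overlap(chunk_size, overlap_depth, img_size):
--     if img_size <= chunk_size or img_size <= overlap_depth:
--         return img_size, 0
--     c = max(chunk_size, overlap_depth)
--     c = -(-c // 8) * 8
--     while img_size % c < overlap_depth:
--         c += 8
--         if img_size <= c:
--             return img_size, 0
--     return c, overlap_depth
-- ===== Notes on version B (the rewrite author's own statement) =====
-- stated objective: simpler
-- what changed: Replaced the tail recursion (which re-evaluates the small-image guard, the clamp and the ceil-rounding on every call) with a single upfront guard, a max()+integer-ceil normalisation done once, and a plain while loop that only increments by 8 and re-checks the small-image bound.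
import Mathlib
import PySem

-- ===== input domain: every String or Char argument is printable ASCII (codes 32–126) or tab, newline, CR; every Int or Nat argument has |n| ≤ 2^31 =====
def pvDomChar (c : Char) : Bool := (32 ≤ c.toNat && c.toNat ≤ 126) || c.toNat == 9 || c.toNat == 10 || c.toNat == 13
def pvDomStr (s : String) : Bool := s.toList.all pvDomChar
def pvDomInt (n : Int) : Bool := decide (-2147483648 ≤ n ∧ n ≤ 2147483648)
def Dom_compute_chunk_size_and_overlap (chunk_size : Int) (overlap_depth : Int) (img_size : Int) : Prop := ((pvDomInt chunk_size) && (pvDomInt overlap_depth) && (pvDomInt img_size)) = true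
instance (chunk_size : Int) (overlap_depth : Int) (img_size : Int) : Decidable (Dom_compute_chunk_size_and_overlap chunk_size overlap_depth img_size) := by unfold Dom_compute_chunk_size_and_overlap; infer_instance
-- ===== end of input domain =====

-- B replaces A's tail recursion by one upfront guard, a max()+integer-ceil normalisation done once,
-- and a plain while loop (objective: simpler; same return value everywhere A returns).

-- ===== PORT A =====
-- math.ceil(x / 8) * 8, ported exactly for integers (float division is exact for |x| ≤ 2^31 < 2^53)
def pyCeil8A (x : Int) : Int :=
  (if (8:Int) ∣ x then PySem.Int.floordiv x 8 else PySem.Int.floordiv x 8 + 1) * 8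

theorem pyCeil8A_ge (x : Int) : x ≤ pyCeil8A x := by
  have h := PySem.Int.floordiv_mul_add_mod x 8
  have h1 := PySem.Int.mod_nonneg x (by norm_num : (0:Int) < 8)
  have h2 := PySem.Int.mod_lt x (by norm_num : (0:Int) < 8)
  unfold pyCeil8A
  split_ifs <;> omega

def compute_chunk_size_and_overlap (chunk_size : Int) (overlap_depth : Int) (img_size : Int) : Int × Int :=
  if img_size ≤ chunk_size ∨ img_size ≤ overlap_depth then (img_size, 0)
  else
    let cs1 : Int := if chunk_size ≤ overlap_depth then overlap_depth else chunk_size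
    let cs2 : Int := pyCeil8A cs1
    if PySem.Int.mod img_size cs2 < overlap_depth then
      compute_chunk_size_and_overlap (cs2 + 8) overlap_depth img_size
    else (cs2, overlap_depth)
termination_by (img_size - chunk_size).toNat
decreasing_by
  simp only [dite_eq_ite, not_or, not_le] at *
  have h1 : chunk_size ≤ (if chunk_size ≤ overlap_depth then overlap_depth else chunk_size) := by
    split_ifs <;> omega
  have h2 := pyCeil8A_ge (if chunk_size ≤ overlap_depth then overlap_depth else chunk_size)
  omega

-- ===== PORT B =====
-- -(-x // 8) * 8
def pyCeil8B (x : Int) : Int := -(PySem.Int.floordiv (-x) 8) * 8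

-- the `while img_size % c < overlap_depth:` loop of Source B
def pvLoopB (overlap_depth : Int) (img_size : Int) (c : Int) : Int × Int :=
  if PySem.Int.mod img_size c < overlap_depth then
    let c' := c + 8
    if img_size ≤ c' then (img_size, 0) else pvLoopB overlap_depth img_size c'
  else (c, overlap_depth)
termination_by (img_size - c).toNat
decreasing_by simp only [not_le] at *; omega

def compute_chunk_size_and_overlap_alt (chunk_size : Int) (overlap_depth : Int) (img_size : Int) : Int × Int :=
  if img_size ≤ chunk_size ∨ img_size ≤ overlap_depth then (img_size, 0)
  else pvLoopB overlap_depth img_size (pyCeil8B (max chunk_size overlap_depth))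

-- ===== PRECONDITION & SPEC =====
-- Pre_ excludes exactly the inputs on which A raises ZeroDivisionError (the 8-rounded
-- max(chunk_size, overlap_depth) is 0, i.e. -7 ≤ max ≤ 0, reached only past the small-image
-- guard); B raises ZeroDivisionError on the same inputs.
def Pre_compute_chunk_size_and_overlap (chunk_size : Int) (overlap_depth : Int) (img_size : Int) : Prop :=
  img_size ≤ chunk_size ∨ img_size ≤ overlap_depth ∨
    1 ≤ max chunk_size overlap_depth ∨ max chunk_size overlap_depth ≤ -8
instance (chunk_size : Int) (overlap_depth : Int) (img_size : Int) : Decidable (Pre_compute_chunk_size_and_overlap chunk_size overlap_depth img_size) := by unfold Pre_compute_chunk_size_and_overlap; infer_instance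

def pvWitness_compute_chunk_size_and_overlap : Int × Int × Int := (16, 4, 100)

def Spec_compute_chunk_size_and_overlap (chunk_size : Int) (overlap_depth : Int) (img_size : Int) (out : Int × Int) : Prop := out = compute_chunk_size_and_overlap_alt chunk_size overlap_depth img_size
instance (chunk_size : Int) (overlap_depth : Int) (img_size : Int) (out : Int × Int) : Decidable (Spec_compute_chunk_size_and_overlap chunk_size overlap_depth img_size out) := by unfold Spec_compute_chunk_size_and_overlap; infer_instance

-- ===== CLAIM (what is proved, stated in full; the proofs are below) =====
def Claim_equal_compute_chunk_size_and_overlap : Prop := ∀ (chunk_size : Int) (overlap_depth : Int) (img_size : Int), Dom_compute_chunk_size_and_overlap chunk_size overlap_depth img_size → Pre_compute_chunk_size_and_overlap chunk_size overlap_depth img_size → Spec_compute_chunk_size_and_overlap chunk_size overlap_depth img_size (compute_chunk_size_and_overlap chunk_size overlap_depth img_size)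

-- ===== LEMMAS AND PROOFS =====

theorem pyCeil8B_ge (x : Int) : x ≤ pyCeil8B x := by
  have h := PySem.Int.floordiv_mul_add_mod (-x) 8
  have h1 := PySem.Int.mod_nonneg (-x) (by norm_num : (0:Int) < 8)
  unfold pyCeil8B; omega

theorem pyCeil8B_dvd (x : Int) : (8:Int) ∣ pyCeil8B x := by
  unfold pyCeil8B; exact ⟨-(PySem.Int.floordiv (-x) 8), by ring⟩

theorem pyCeil8_eq (x : Int) : pyCeil8A x = pyCeil8B x := by
  have ha := PySem.Int.floordiv_mul_add_mod x 8
  have ha1 := PySem.Int.mod_nonneg x (by norm_num : (0:Int) < 8)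
  have ha2 := PySem.Int.mod_lt x (by norm_num : (0:Int) < 8)
  have hd := PySem.Int.mod_eq_zero_iff_dvd x 8
  have hb := PySem.Int.floordiv_mul_add_mod (-x) 8
  have hb1 := PySem.Int.mod_nonneg (-x) (by norm_num : (0:Int) < 8)
  have hb2 := PySem.Int.mod_lt (-x) (by norm_num : (0:Int) < 8)
  unfold pyCeil8A pyCeil8B
  split_ifs with h
  · rw [← hd] at h; omega
  · rw [← hd] at h; omega

theorem pyCeil8A_fix {x : Int} (h : (8:Int) ∣ x) : pyCeil8A x = x := by
  have ha := PySem.Int.floordiv_mul_add_mod x 8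
  have hd := PySem.Int.mod_eq_zero_iff_dvd x 8
  unfold pyCeil8A
  rw [if_pos h]
  omega

-- A, started at an 8-aligned chunk already at least the overlap, is exactly B's while loop.
theorem A_eq_loop : ∀ (n : Nat) (chunk overlap img : Int),
    (img - chunk).toNat ≤ n → ¬ img ≤ chunk → ¬ img ≤ overlap → overlap ≤ chunk → (8:Int) ∣ chunk →
    compute_chunk_size_and_overlap chunk overlap img = pvLoopB overlap img chunk := by
  intro n
  induction n with
  | zero => intro chunk overlap img hm hc _ _ _; omega
  | succ m ih =>
    intro chunk overlap img hm hc ho hoc hdvd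
    rw [compute_chunk_size_and_overlap.eq_def, pvLoopB.eq_def]
    rw [if_neg (by tauto)]
    have hcs1 : (if chunk ≤ overlap then overlap else chunk) = chunk := by
      split_ifs with h <;> omega
    simp only [hcs1, pyCeil8A_fix hdvd]
    by_cases hmod : PySem.Int.mod img chunk < overlap
    · rw [if_pos hmod, if_pos hmod]
      by_cases hle : img ≤ chunk + 8
      · rw [if_pos hle, compute_chunk_size_and_overlap.eq_def, if_pos (Or.inl hle)]
      · rw [if_neg hle]
        exact ih (chunk + 8) overlap img (by omega) hle ho (by omega)
          (dvd_add hdvd ⟨1, by ring⟩)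
    · rw [if_neg hmod, if_neg hmod]

-- One unfolded step of A past the guard equals B's loop entered at the rounded chunk.
theorem step_eq (overlap img r : Int) (ho : ¬ img ≤ overlap) (hor : overlap ≤ r)
    (hdvd : (8:Int) ∣ r) :
    (if PySem.Int.mod img r < overlap then
        compute_chunk_size_and_overlap (r + 8) overlap img
      else (r, overlap)) = pvLoopB overlap img r := by
  rw [pvLoopB.eq_def]
  by_cases hmod : PySem.Int.mod img r < overlap
  · rw [if_pos hmod, if_pos hmod]
    by_cases hle : img ≤ r + 8
    · rw [if_pos hle, compute_chunk_size_and_overlap.eq_def, if_pos (Or.inl hle)]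
    · rw [if_neg hle]
      exact A_eq_loop (img - (r + 8)).toNat (r + 8) overlap img le_rfl hle ho (by omega)
        (dvd_add hdvd ⟨1, by ring⟩)
  · rw [if_neg hmod, if_neg hmod]

-- ===== VERDICT (by name: the statement is the Claim_ definition above) =====
theorem compute_chunk_size_and_overlap_spec : Claim_equal_compute_chunk_size_and_overlap := by
  intro chunk_size overlap_depth img_size _ _
  unfold Spec_compute_chunk_size_and_overlap
  rw [compute_chunk_size_and_overlap.eq_def]
  unfold compute_chunk_size_and_overlap_alt
  by_cases hg : img_size ≤ chunk_size ∨ img_size ≤ overlap_depth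
  · rw [if_pos hg, if_pos hg]
  · rw [if_neg hg, if_neg hg]
    have hmax : (if chunk_size ≤ overlap_depth then overlap_depth else chunk_size)
        = max chunk_size overlap_depth := (max_def chunk_size overlap_depth).symm
    simp only [hmax, pyCeil8_eq]
    exact step_eq overlap_depth img_size (pyCeil8B (max chunk_size overlap_depth))
      (by tauto) (le_trans (le_max_right _ _) (pyCeil8B_ge _)) (pyCeil8B_dvd _)
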